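-- pv_equiv track=rewrite | github.com/Late2005/ijssalon_ellie | reclame.py | meervoudig
-- ===== SOURCE A (Python) =====
-- def laag_en_hoog(mijn_lijst):
--     laag = min(mijn_lijst)
--     hoog = max(mijn_lijst)
--     return list((laag,hoog))
--
-- def meervoudig(invoer_lijst):
--     if all(isinstance(n, int) for n in invoer_lijst) == False:
--             return f"Voer uitsluitend gehele getallen in."
--     else:
--         if len(invoer_lijst) < 5:
--             return f"Lijst moet minimaal 5 waarden bevatten"
--         else:
--             if len(invoer_lijst) > 10:
--                     return f"Lijst mag maximaal 10 waarden bevatten"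
--             else:
--                 return laag_en_hoog(invoer_lijst)
-- ===== SOURCE B (Python) =====
-- def meervoudig(invoer_lijst):
--     if not all(isinstance(n, int) for n in invoer_lijst):
--         return "Voer uitsluitend gehele getallen in."
--     if len(invoer_lijst) < 5:
--         return "Lijst moet minimaal 5 waarden bevatten"
--     if len(invoer_lijst) > 10:
--         return "Lijst mag maximaal 10 waarden bevatten"
--     s = sorted(invoer_lijst)
--     return [s[0], s[-1]]
-- ===== Notes on version B (the rewrite author's own statement) =====
-- stated objective: alternative
-- what changed: Instead of the helper's min()/max() extremum scans, B sorts the validated list once and returns its first and last element; the nested else-cascade becomes an early-return chain.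
import Mathlib
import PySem

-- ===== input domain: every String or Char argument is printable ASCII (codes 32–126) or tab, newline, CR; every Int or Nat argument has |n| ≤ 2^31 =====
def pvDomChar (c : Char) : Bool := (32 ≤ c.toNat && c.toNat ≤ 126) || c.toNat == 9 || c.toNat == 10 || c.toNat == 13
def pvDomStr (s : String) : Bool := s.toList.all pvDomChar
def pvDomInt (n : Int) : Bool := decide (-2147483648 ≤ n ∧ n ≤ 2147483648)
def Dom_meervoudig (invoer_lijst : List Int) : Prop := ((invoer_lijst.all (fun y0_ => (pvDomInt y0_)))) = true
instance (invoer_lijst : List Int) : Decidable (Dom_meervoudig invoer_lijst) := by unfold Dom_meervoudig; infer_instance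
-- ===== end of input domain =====

-- B replaces the helper's min()/max() extremum scans by one sort, returning the sorted list's
-- first and last element; no speed claim. Equivalence of the RETURN value on Pre_.

-- ===== PORT A =====
-- helper laag_en_hoog: min then max (PySem.List.min?/max? = Python min/max; raise on [] → none)
def laagEnHoog (mijn_lijst : List Int) : List Int :=
  match PySem.List.min? mijn_lijst (fun x => x), PySem.List.max? mijn_lijst (fun x => x) with
  | some laag, some hoog => [laag, hoog]
  | _, _ => []   -- Python min/max raise on []; unreachable under Pre_ (length ≥ 5)

def meervoudig (invoer_lijst : List Int) : List Int :=
  -- 'all(isinstance(n, int) …)' is always True for a List Int: that branch cannot return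
  if invoer_lijst.length < 5 then []        -- Python returns a string here: outside Pre_
  else if invoer_lijst.length > 10 then []  -- string here too: outside Pre_
  else laagEnHoog invoer_lijst

-- ===== PORT B =====
def meervoudig_alt (invoer_lijst : List Int) : List Int :=
  if invoer_lijst.length < 5 then []        -- string in Python: outside Pre_
  else if invoer_lijst.length > 10 then []  -- string in Python: outside Pre_
  else
    let s := PySem.List.sorted invoer_lijst (fun x => x) false
    match PySem.List.pyGet? s 0, PySem.List.pyGet? s (-1) with
    | some a, some b => [a, b]
    | _, _ => []   -- unreachable: s nonempty since length ≥ 5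

-- ===== PRECONDITION & SPEC =====
-- Pre_ excludes lists of length < 5 or > 10: there A returns a Dutch error STRING, which is not
-- a value of the declared List Int return type (the isinstance branch cannot fire: all elements
-- are ints by type).
def Pre_meervoudig (invoer_lijst : List Int) : Prop :=
  5 ≤ invoer_lijst.length ∧ invoer_lijst.length ≤ 10
instance (invoer_lijst : List Int) : Decidable (Pre_meervoudig invoer_lijst) := by
  unfold Pre_meervoudig; infer_instance
def pvWitness_meervoudig : List Int := [3, -1, 4, 1, 5]

def Spec_meervoudig (invoer_lijst : List Int) (out : List Int) : Prop := out = meervoudig_alt invoer_lijst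
instance (invoer_lijst : List Int) (out : List Int) : Decidable (Spec_meervoudig invoer_lijst out) := by unfold Spec_meervoudig; infer_instance

-- ===== CLAIM (what is proved, stated in full; the proofs are below) =====
def Claim_equal_meervoudig : Prop := ∀ (invoer_lijst : List Int), Dom_meervoudig invoer_lijst → Pre_meervoudig invoer_lijst → Spec_meervoudig invoer_lijst (meervoudig invoer_lijst)

-- ===== LEMMAS AND PROOFS =====

-- the running-min fold is a member of the list and a lower bound of it
theorem foldl_min_mem (t : List Int) (a : Int) : t.foldl min a ∈ a :: t := by
  induction t generalizing a with
  | nil => simp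
  | cons y t ih =>
    simp only [List.foldl_cons, List.mem_cons] at *
    rcases ih (min a y) with h | h
    · rw [h]
      rcases le_total a y with hle | hle
      · exact Or.inl (min_eq_left hle)
      · exact Or.inr (Or.inl (min_eq_right hle))
    · exact Or.inr (Or.inr h)

theorem foldl_min_le (t : List Int) (a : Int) : ∀ y ∈ a :: t, t.foldl min a ≤ y := by
  induction t generalizing a with
  | nil =>
    intro y hy
    simp only [List.mem_cons, List.not_mem_nil, or_false] at hy
    subst hy; simp
  | cons z t ih =>
    intro y hy
    simp only [List.mem_cons] at hy
    simp only [List.foldl_cons]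
    have hb := ih (min a z)
    rcases hy with h | h | h
    · subst h; exact le_trans (hb _ List.mem_cons_self) (min_le_left _ _)
    · subst h; exact le_trans (hb _ List.mem_cons_self) (min_le_right _ _)
    · exact hb y (List.mem_cons_of_mem _ h)

theorem foldl_max_mem (t : List Int) (a : Int) : t.foldl max a ∈ a :: t := by
  induction t generalizing a with
  | nil => simp
  | cons y t ih =>
    simp only [List.foldl_cons, List.mem_cons] at *
    rcases ih (max a y) with h | h
    · rw [h]
      rcases le_total a y with hle | hle
      · exact Or.inr (Or.inl (max_eq_right hle))
      · exact Or.inl (max_eq_left hle)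
    · exact Or.inr (Or.inr h)

theorem foldl_max_ge (t : List Int) (a : Int) : ∀ y ∈ a :: t, y ≤ t.foldl max a := by
  induction t generalizing a with
  | nil =>
    intro y hy
    simp only [List.mem_cons, List.not_mem_nil, or_false] at hy
    subst hy; simp
  | cons z t ih =>
    intro y hy
    simp only [List.mem_cons] at hy
    simp only [List.foldl_cons]
    have hb := ih (max a z)
    rcases hy with h | h | h
    · subst h; exact le_trans (le_max_left _ _) (hb _ List.mem_cons_self)
    · subst h; exact le_trans (le_max_right _ _) (hb _ List.mem_cons_self)
    · exact hb y (List.mem_cons_of_mem _ h)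

-- in a (≤)-pairwise list every element is ≤ the last one
theorem pairwise_le_getLast (l : List Int) (hp : l.Pairwise (· ≤ ·)) (hne : l ≠ []) :
    ∀ y ∈ l, y ≤ l.getLast hne := by
  induction l with
  | nil => simp at hne
  | cons a t ih =>
    rw [List.pairwise_cons] at hp
    obtain ⟨h1, h2⟩ := hp
    intro y hy
    cases t with
    | nil =>
      simp only [List.mem_cons, List.not_mem_nil, or_false] at hy
      subst hy; simp [List.getLast]
    | cons b t' =>
      rw [List.getLast_cons (by simp)]
      rcases List.mem_cons.1 hy with rfl | h
      · exact le_trans (h1 b (by simp)) (ih h2 (by simp) b (by simp))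
      · exact ih h2 (by simp) y h

theorem meervoudig_spec : Claim_equal_meervoudig := by
  intro xs _ hpre
  unfold Spec_meervoudig meervoudig meervoudig_alt laagEnHoog
  obtain ⟨h5, h10⟩ := hpre
  match xs with
  | [] => simp at h5
  | a :: t =>
    rw [if_neg (by omega), if_neg (by omega), if_neg (by omega), if_neg (by omega)]
    rw [PySem.List.min?_id_cons, PySem.List.max?_id_cons]
    have hperm := PySem.List.sorted_perm (a :: t) (fun x => x) false
    have hsne : PySem.List.sorted (a :: t) (fun x => x) false ≠ [] := by
      intro he; have := hperm.length_eq; simp [he] at this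
    match hs : PySem.List.sorted (a :: t) (fun x => x) false with
    | [] => exact absurd hs hsne
    | m :: s =>
      have hmemsorted : ∀ y, y ∈ m :: s ↔ y ∈ a :: t := by
        intro y; rw [← hs]; exact (PySem.List.sorted_perm _ _ _).mem_iff
      have hpw : (m :: s).Pairwise (fun x y : Int => x ≤ y) := by
        rw [← hs]
        simpa using PySem.List.sorted_pairwise (a :: t) (fun x => x)
      have hget0 : PySem.List.pyGet? (m :: s) (0 : Int) = some m := by
        simp [PySem.List.pyGet?, PySem.List.pyIdx?]
      have hgetlast : PySem.List.pyGet? (m :: s) (-1 : Int)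
          = some ((m :: s).getLast (by simp)) := by
        simp only [PySem.List.pyGet?, PySem.List.pyIdx?, List.getLast_eq_getElem]
        norm_num [List.getElem?_eq_getElem]
        rfl
      have hmin : t.foldl min a = m := by
        apply le_antisymm
        · exact foldl_min_le t a m ((hmemsorted m).1 (by simp))
        · exact PySem.List.key_head_sorted_le _ _ hs _ (foldl_min_mem t a)
      have hmax : t.foldl max a = (m :: s).getLast (by simp) := by
        apply le_antisymm
        · exact pairwise_le_getLast (m :: s) hpw (by simp) _
            ((hmemsorted _).2 (foldl_max_mem t a))
        · exact foldl_max_ge t a _ ((hmemsorted _).1 (List.getLast_mem _))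
      simp only [hget0, hgetlast, hmin, hmax]
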